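-- pv_equiv track=rewrite | github.com/takecap/70puzzles | src/q10.py | set_table
-- ===== SOURCE A (Python) =====
-- def set_table(roulette):
--   size = len(roulette)
--   roulette2 = roulette * 2
--   table = [[0]] * size
--   table[1] = [num for num in roulette]
--   for n in range(2, size):
--     table[n] = [num + roulette2[idx + n -1] for idx, num in enumerate(table[n-1])]
--   return table
-- ===== SOURCE B (Python) =====
-- def set_table(roulette):
--   size = len(roulette)
--   prefix = [0]
--   for num in roulette * 2:
--     prefix.append(prefix[-1] + num)
--   return ([[0]] + [list(roulette)] +
--           [[prefix[idx + n] - prefix[idx] for idx in range(size)]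
--            for n in range(2, size)])
-- ===== Notes on version B (the rewrite author's own statement) =====
-- stated objective: alternative
-- what changed: Replaces A's incremental DP (each row built by extending the previous row with one more element of the doubled array, so every row depends on the previous one) with a prefix-sum scheme: one pass builds prefix sums of the doubled list, then every table entry is computed independently as a difference of two prefix sums; there is no preallocation, indexed assignment or dependence between rows.
-- outside the precondition, e.g. on set_table([1]): A raises IndexError, B returns [[0], [1]]
import Mathlib
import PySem

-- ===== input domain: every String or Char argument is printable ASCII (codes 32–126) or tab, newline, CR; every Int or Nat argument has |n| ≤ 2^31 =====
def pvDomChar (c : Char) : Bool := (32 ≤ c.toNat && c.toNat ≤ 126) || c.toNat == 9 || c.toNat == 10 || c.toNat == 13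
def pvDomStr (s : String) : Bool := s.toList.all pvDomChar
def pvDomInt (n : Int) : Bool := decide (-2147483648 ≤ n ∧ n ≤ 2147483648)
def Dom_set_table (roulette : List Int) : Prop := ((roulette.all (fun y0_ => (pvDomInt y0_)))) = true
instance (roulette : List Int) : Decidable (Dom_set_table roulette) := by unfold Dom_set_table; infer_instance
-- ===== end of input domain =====

-- B builds prefix sums of the doubled list once and computes every table entry as a
-- difference of two prefix sums, instead of A's incremental row-by-row DP; objective:
-- alternative algorithm of the same cost (not claimed faster).

-- ===== PORT A =====
def set_table (roulette : List Int) : List (List Int) :=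
  let size := roulette.length
  let roulette2 := roulette ++ roulette
  let table := (List.replicate size ([0] : List Int)).set 1 roulette
  (List.range' 2 (size - 2)).foldl
    (fun t n =>
      t.set n ((PySem.List.enumerate (t.getD (n - 1) [])).map
        (fun p => p.2 + PySem.List.pyGetD roulette2 (p.1 + (n : Int) - 1) 0)))
    table

-- ===== PORT B =====
def set_table_alt (roulette : List Int) : List (List Int) :=
  let size := roulette.length
  let prefixSums := (roulette ++ roulette).foldl (fun p num => p ++ [p.getLast! + num]) [0]
  [[0]] ++ [roulette] ++
    (List.range' 2 (size - 2)).map (fun (n : Nat) =>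
      (List.range size).map (fun (idx : Nat) => prefixSums.getD (idx + n) 0 - prefixSums.getD idx 0))

-- ===== PRECONDITION & SPEC =====
-- Pre_ excludes lists of length < 2, on which A raises IndexError at the `table[1]` assignment.
def Pre_set_table (roulette : List Int) : Prop := 2 ≤ roulette.length
instance (roulette : List Int) : Decidable (Pre_set_table roulette) := by
  unfold Pre_set_table; infer_instance
def pvWitness_set_table : List Int := [3, 1]

def Spec_set_table (roulette : List Int) (out : List (List Int)) : Prop := out = set_table_alt roulette
instance (roulette : List Int) (out : List (List Int)) : Decidable (Spec_set_table roulette out) := by unfold Spec_set_table; infer_instance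

-- ===== CLAIM (what is proved, stated in full; the proofs are below) =====
def Claim_equal_set_table : Prop := ∀ (roulette : List Int), Dom_set_table roulette → Pre_set_table roulette → Spec_set_table roulette (set_table roulette)

-- ===== LEMMAS AND PROOFS =====

-- row n of the intended table: window sums of length n over the doubled list
def pvW (roulette : List Int) (n : Nat) : List Int :=
  (List.range roulette.length).map (fun i => (((roulette ++ roulette).drop i).take n).sum)

-- row n of the final table (row 0 keeps its [0] placeholder)
def pvR (roulette : List Int) (n : Nat) : List Int :=
  if n = 0 then [0] else pvW roulette n

-- table state after rows < m have been filled in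
def pvT (roulette : List Int) (m : Nat) : List (List Int) :=
  (List.range m).map (pvR roulette) ++ List.replicate (roulette.length - m) [0]

theorem pvW_one (roulette : List Int) : pvW roulette 1 = roulette := by
  apply List.ext_getElem
  · simp [pvW]
  · intro i h1 h2
    simp only [pvW, List.getElem_map, List.getElem_range]
    simp only [pvW, List.length_map, List.length_range] at h1
    have hi : i < (roulette ++ roulette).length := by simp; omega
    rw [List.drop_eq_getElem_cons hi]
    simp [List.getElem_append_left h1]

theorem pvW_succ (roulette : List Int) (m : Nat) (hm : 1 ≤ m) (hms : m ≤ roulette.length) :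
    (List.range roulette.length).map
      (fun i => (((roulette ++ roulette).drop i).take (m - 1)).sum
        + (roulette ++ roulette).getD (i + m - 1) 0) = pvW roulette m := by
  unfold pvW
  apply List.map_congr_left
  intro i hi
  rw [List.mem_range] at hi
  have hidx : i + m - 1 = i + (m - 1) := by omega
  have hlen : i + (m - 1) < (roulette ++ roulette).length := by simp; omega
  have hm1 : m = (m - 1) + 1 := by omega
  rw [hidx, List.getD_eq_getElem _ _ hlen]
  conv_rhs => rw [hm1]
  rw [List.take_add_one]
  have hsome : ((roulette ++ roulette).drop i)[m - 1]? = some ((roulette ++ roulette)[i + (m - 1)]) := by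
    rw [List.getElem?_eq_getElem (by simp; omega), List.getElem_drop]
  rw [hsome]
  simp

theorem pvT_init (roulette : List Int) (h : 2 ≤ roulette.length) :
    (List.replicate roulette.length ([0] : List Int)).set 1 roulette = pvT roulette 2 := by
  have : roulette.length = 2 + (roulette.length - 2) := by omega
  rw [this, List.replicate_add]
  simp [pvT, pvR, pvW_one, List.range_succ, List.replicate_succ]

theorem pvT_step (roulette : List Int) (m : Nat) (h2 : 2 ≤ m) (hm : m < roulette.length) :
    (pvT roulette m).set m
      ((PySem.List.enumerate ((pvT roulette m).getD (m - 1) [])).map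
        (fun p => p.2 + PySem.List.pyGetD (roulette ++ roulette) (p.1 + (m : Int) - 1) 0))
      = pvT roulette (m + 1) := by
  have hgetD : (pvT roulette m).getD (m - 1) [] = pvW roulette (m - 1) := by
    rw [pvT, List.getD_append _ _ _ _ (by simp; omega),
        List.getD_eq_getElem _ _ (by simp; omega)]
    simp [pvR, show ¬ (m - 1 = 0) by omega]
  rw [hgetD]
  have hrow : (PySem.List.enumerate (pvW roulette (m - 1))).map
      (fun p => p.2 + PySem.List.pyGetD (roulette ++ roulette) (p.1 + (m : Int) - 1) 0)
      = pvW roulette m := by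
    rw [PySem.List.enumerate_eq_map_pyRange _ (0 : Int), List.map_map]
    have hlen : PySem.List.len (pvW roulette (m - 1)) = (roulette.length : Int) := by
      simp [PySem.List.len, pvW]
    rw [hlen, PySem.List.pyRange_zero_nat, List.map_map]
    rw [← pvW_succ roulette m (by omega) (by omega)]
    apply List.map_congr_left
    intro i hi
    rw [List.mem_range] at hi
    simp only [Function.comp]
    have hc : (i : Int) + (m : Int) - 1 = ((i + m - 1 : Nat) : Int) := by omega
    rw [hc]
    simp only [PySem.List.pyGetD_natCast]
    congr 1
    rw [pvW]
    rw [List.getD_eq_getElem _ _ (by simp; omega)]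
    simp
  rw [hrow, pvT, List.set_append_right _ _ (by simp)]
  have hidx : m - (List.map (pvR roulette) (List.range m)).length = 0 := by simp
  rw [hidx]
  have hrep : List.replicate (roulette.length - m) ([0] : List Int)
      = [0] :: List.replicate (roulette.length - (m + 1)) [0] := by
    rw [show roulette.length - m = (roulette.length - (m + 1)) + 1 by omega]
    simp [List.replicate_succ]
  rw [hrep]
  simp [pvT, List.range_succ, pvR, show ¬ (m = 0) by omega]

theorem pvT_fold (roulette : List Int) (j : Nat) (hj : 2 + j ≤ roulette.length) :
    (List.range' 2 j).foldl
      (fun t n =>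
        t.set n ((PySem.List.enumerate (t.getD (n - 1) [])).map
          (fun p => p.2 + PySem.List.pyGetD (roulette ++ roulette) (p.1 + (n : Int) - 1) 0)))
      (pvT roulette 2) = pvT roulette (2 + j) := by
  induction j with
  | zero => simp
  | succ k ih =>
    rw [List.range'_1_concat, List.foldl_append, ih (by omega)]
    simp only [List.foldl_cons, List.foldl_nil]
    rw [show 2 + (k + 1) = (2 + k) + 1 by omega]
    exact pvT_step roulette (2 + k) (by omega) (by omega)

theorem set_table_eq_pvT (roulette : List Int) (h : 2 ≤ roulette.length) :
    set_table roulette = (List.range roulette.length).map (pvR roulette) := by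
  unfold set_table
  simp only
  rw [pvT_init roulette h, pvT_fold roulette (roulette.length - 2) (by omega)]
  rw [pvT, show 2 + (roulette.length - 2) = roulette.length by omega]
  simp

theorem pvFoldPrefix (l : List Int) (P : List Int) (h : P ≠ []) :
    l.foldl (fun p num => p ++ [p.getLast! + num]) P
      = P ++ (List.range l.length).map (fun k => P.getLast! + (l.take (k + 1)).sum) := by
  induction l generalizing P with
  | nil => simp
  | cons x xs ih =>
    simp only [List.foldl_cons]
    rw [ih (P ++ [P.getLast! + x]) (by simp)]
    rw [List.length_cons, List.range_succ_eq_map]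
    simp only [List.map_cons, List.map_map]
    rw [List.append_assoc]
    congr 1
    simp only [List.singleton_append, List.take_succ_cons, List.sum_cons, List.take_zero,
      List.sum_nil, add_zero]
    congr 1
    apply List.map_congr_left
    intro k _
    simp only [Function.comp]
    have : (P ++ [P.getLast! + x]).getLast! = P.getLast! + x := by simp
    rw [this]
    simp [add_assoc]

theorem pvPrefixGetD (l : List Int) (k : Nat) (hk : k ≤ l.length) :
    (l.foldl (fun p num => p ++ [p.getLast! + num]) [0]).getD k 0 = (l.take k).sum := by
  rw [pvFoldPrefix l [0] (by simp)]
  have h0 : ([0] : List Int).getLast! = 0 := rfl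
  rw [h0]
  simp only [zero_add, List.singleton_append]
  cases k with
  | zero => simp
  | succ j =>
    have hj : j < l.length := by omega
    rw [List.getD_cons_succ]
    exact PySem.List.getD_map_range _ _ _ _ hj

theorem set_table_alt_eq (roulette : List Int) (h : 2 ≤ roulette.length) :
    set_table_alt roulette = [[0]] ++ [roulette] ++
      (List.range' 2 (roulette.length - 2)).map (pvW roulette) := by
  unfold set_table_alt
  simp only
  congr 1
  apply List.map_congr_left
  intro n hn
  have hnlt : n < roulette.length := by
    have := List.mem_range'.mp hn
    omega
  unfold pvW
  apply List.map_congr_left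
  intro i hi
  rw [List.mem_range] at hi
  have hlen2 : (roulette ++ roulette).length = roulette.length + roulette.length := by simp
  rw [pvPrefixGetD _ (i + n) (by omega), pvPrefixGetD _ i (by omega)]
  rw [List.take_add, List.sum_append]
  ring

-- ===== VERDICT (by name: the statement is the Claim_ definition above) =====
theorem set_table_spec : Claim_equal_set_table := by
  intro roulette _ hpre
  unfold Spec_set_table
  obtain ⟨k, hk⟩ : ∃ k, roulette.length = k + 2 := ⟨roulette.length - 2, by unfold Pre_set_table at hpre; omega⟩
  rw [set_table_eq_pvT roulette hpre, set_table_alt_eq roulette hpre, hk]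
  have hr : List.range (k + 2) = 0 :: 1 :: List.range' 2 k := by
    simp [List.range_eq_range', List.range'_succ]
  rw [hr, show k + 2 - 2 = k by omega]
  simp only [List.map_cons, List.cons_append, List.nil_append]
  rw [show pvR roulette 0 = [0] by simp [pvR], show pvR roulette 1 = roulette by simp [pvR, pvW_one]]
  congr 1
  congr 1
  apply List.map_congr_left
  intro n hn
  have h2 : 2 ≤ n := by
    have := List.mem_range'.mp hn
    omega
  simp [pvR, show ¬ (n = 0) by omega]
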